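-- pv_equiv track=rewrite | github.com/MrHamdulay/csc3-capstone | cheaters/algorithms/suffixtreealgorithm.py | _whitespaced_stripped_with_line_numbers
-- ===== SOURCE A (Python) =====
-- def _whitespaced_stripped_with_line_numbers(string):
--     '''
--     strips whitespace and new lines and generates a list of line numbers
--     so we can re-add line information when necessary
--
--     @param string program source input
--     @returns [stripped string, line numbers]
--     '''
--     WHITESPACE = ' \n\t'
--     line_number = 0
--     s = ''
--     line_numbers = []
--     for char in string:
--         if char == '\n':
--             line_number += 1
--         if char in WHITESPACE:
--             continue
--         s += char
--         line_numbers.append(line_number)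
--     line_numbers.append(line_number)
--     return s, line_numbers
-- ===== SOURCE B (Python) =====
-- def _whitespaced_stripped_with_line_numbers(string):
--     parts = string.split('\n')
--     chars = []
--     line_numbers = []
--     for i, line in enumerate(parts):
--         for c in line:
--             if c not in ' \t':
--                 chars.append(c)
--                 line_numbers.append(i)
--     line_numbers.append(len(parts) - 1)
--     return ''.join(chars), line_numbers
-- ===== Notes on version B (the rewrite author's own statement) =====
-- stated objective: alternative
-- what changed: B splits the input on newlines once and uses the enumerate index of each line segment as the line number (appending len(parts)-1 at the end), instead of A's single character loop that carries and increments a running line counter.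
import Mathlib
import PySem

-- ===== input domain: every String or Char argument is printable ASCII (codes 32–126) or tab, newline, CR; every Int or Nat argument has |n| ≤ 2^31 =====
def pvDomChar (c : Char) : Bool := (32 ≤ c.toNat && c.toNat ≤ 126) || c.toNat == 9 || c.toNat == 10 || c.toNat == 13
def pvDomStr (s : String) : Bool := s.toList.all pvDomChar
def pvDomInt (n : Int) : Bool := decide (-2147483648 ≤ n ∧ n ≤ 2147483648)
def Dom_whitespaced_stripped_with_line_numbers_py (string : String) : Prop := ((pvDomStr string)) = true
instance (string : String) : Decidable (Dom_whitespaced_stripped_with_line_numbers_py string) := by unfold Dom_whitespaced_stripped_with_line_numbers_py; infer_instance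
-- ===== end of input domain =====

-- B splits the input on newlines once and uses the enumerate index of each segment as the
-- line number, instead of A's single character loop carrying a running line counter (alternative decomposition).


-- ===== PORT A =====
-- the accumulated string s is kept as a List Char and rebuilt with String.mk at the end
-- (exact: Lean's String.append is opaque to the kernel; the character sequence is identical)
def whitespaced_stripped_with_line_numbers_py (string : String) : String × List Int :=
  let st := string.toList.foldl
    (fun (st : Int × List Char × List Int) char =>
      let line_number := if char = '\n' then st.1 + 1 else st.1
      if char = '\n' ∨ char = ' ' ∨ char = '\t' then (line_number, st.2.1, st.2.2)
      else (line_number, st.2.1 ++ [char], st.2.2 ++ [line_number]))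
    (0, [], [])
  (String.mk st.2.1, st.2.2 ++ [st.1])

-- ===== PORT B =====
-- chars is the list joined at the end (''.join); string.split('\n') is PySem.Chars.splitOn
def whitespaced_stripped_with_line_numbers_py_alt (string : String) : String × List Int :=
  let parts := PySem.Chars.splitOn string.toList ['\n']
  let st := (PySem.List.enumerate parts).foldl
    (fun (acc : List Char × List Int) (p : Int × List Char) =>
      p.2.foldl
        (fun (acc : List Char × List Int) c =>
          if c = ' ' ∨ c = '\t' then acc else (acc.1 ++ [c], acc.2 ++ [p.1]))
        acc)
    ([], [])
  (String.mk st.1, st.2 ++ [(parts.length : Int) - 1])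

-- ===== PRECONDITION & SPEC =====
def Spec_whitespaced_stripped_with_line_numbers_py (string : String) (out : String × List Int) : Prop := out = whitespaced_stripped_with_line_numbers_py_alt string
instance (string : String) (out : String × List Int) : Decidable (Spec_whitespaced_stripped_with_line_numbers_py string out) := by unfold Spec_whitespaced_stripped_with_line_numbers_py; infer_instance

-- ===== CLAIM (what is proved, stated in full; the proofs are below) =====
def Claim_equal_whitespaced_stripped_with_line_numbers_py : Prop := ∀ (string : String), Dom_whitespaced_stripped_with_line_numbers_py string → Spec_whitespaced_stripped_with_line_numbers_py string (whitespaced_stripped_with_line_numbers_py string)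

-- ===== LEMMAS AND PROOFS =====

-- split of a char list on '\n' as (first segment, remaining segments)
def pvSplit : List Char → List Char × List (List Char)
  | [] => ([], [])
  | c :: cs =>
      let m := pvSplit cs
      if c = '\n' then ([], m.1 :: m.2) else (c :: m.1, m.2)

-- characters of a segment surviving the space/tab filter
def pvFilt (l : List Char) : List Char := l.filter (fun c => ¬ (c = ' ' ∨ c = '\t'))

lemma pvFilt_cons (c : Char) (l : List Char) :
    pvFilt (c :: l) = if c = ' ' ∨ c = '\t' then pvFilt l else c :: pvFilt l := by
  by_cases hw : c = ' ' ∨ c = '\t'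
  · rcases hw with h | h <;> subst h <;> simp [pvFilt]
  · push Not at hw
    simp [pvFilt, hw.1, hw.2]

-- semantic value of the whole computation, by recursion on the chars with the line counter
def pvRun (n : Int) : List Char → List Char × List Int
  | [] => ([], [])
  | c :: cs =>
      if c = '\n' then pvRun (n + 1) cs
      else if c = ' ' ∨ c = '\t' then pvRun n cs
      else (c :: (pvRun n cs).1, n :: (pvRun n cs).2)

-- semantic value of B's nested loops on a segment list, by recursion on the segments
def pvRunParts (i : Int) : List (List Char) → List Char × List Int
  | [] => ([], [])
  | p :: ps =>
      let r := pvRunParts (i + 1) ps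
      (pvFilt p ++ r.1, List.replicate (pvFilt p).length i ++ r.2)

lemma pvSplitOn_go_char (fuel : Nat) : ∀ (l cur : List Char) (acc : List (List Char)),
    l.length < fuel →
    PySem.Chars.splitOn.go ['\n'] fuel l cur acc
      = acc.reverse ++ (cur.reverse ++ (pvSplit l).1) :: (pvSplit l).2 := by
  induction fuel with
  | zero => intro l cur acc h; omega
  | succ fuel ih =>
    intro l cur acc h
    cases l with
    | nil => simp [PySem.Chars.splitOn.go, pvSplit]
    | cons c rest =>
      by_cases hc : c = '\n'
      · subst hc
        rw [show PySem.Chars.splitOn.go ['\n'] (fuel + 1) ('\n' :: rest) cur acc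
              = PySem.Chars.splitOn.go ['\n'] fuel (List.drop 1 ('\n' :: rest)) [] (cur.reverse :: acc) from by
            simp [PySem.Chars.splitOn.go, List.isPrefixOf]]
        rw [ih _ _ _ (by simp at h ⊢; omega)]
        simp [pvSplit]
      · rw [show PySem.Chars.splitOn.go ['\n'] (fuel + 1) (c :: rest) cur acc
              = PySem.Chars.splitOn.go ['\n'] fuel rest (c :: cur) acc from by
            simp [PySem.Chars.splitOn.go, List.isPrefixOf, Ne.symm hc]]
        rw [ih _ _ _ (by simp at h ⊢; omega)]
        simp [pvSplit, hc]

lemma pvSplitOn_eq (cs : List Char) :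
    PySem.Chars.splitOn cs ['\n'] = (pvSplit cs).1 :: (pvSplit cs).2 := by
  unfold PySem.Chars.splitOn
  rw [pvSplitOn_go_char (cs.length + 1) cs [] [] (by omega)]
  simp

lemma pvSplit_snd_length (cs : List Char) : (pvSplit cs).2.length = cs.count '\n' := by
  induction cs with
  | nil => simp [pvSplit]
  | cons c cs ih =>
    by_cases hc : c = '\n'
    · subst hc; simp [pvSplit, ih]
    · simp [pvSplit, hc, ih]

-- A's loop computes pvRun (plus the newline count as the final counter value)
lemma pvFoldA (cs : List Char) : ∀ (n : Int) (s : List Char) (ls : List Int),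
    cs.foldl
      (fun (st : Int × List Char × List Int) char =>
        let line_number := if char = '\n' then st.1 + 1 else st.1
        if char = '\n' ∨ char = ' ' ∨ char = '\t' then (line_number, st.2.1, st.2.2)
        else (line_number, st.2.1 ++ [char], st.2.2 ++ [line_number]))
      (n, s, ls)
    = (n + (cs.count '\n' : Int), s ++ (pvRun n cs).1, ls ++ (pvRun n cs).2) := by
  induction cs with
  | nil => intro n s ls; simp [pvRun]
  | cons c cs ih =>
    intro n s ls
    by_cases hc : c = '\n'
    · subst hc
      simp only [List.foldl_cons]
      rw [ih]
      simp [pvRun]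
      ring
    · by_cases hw : c = ' ' ∨ c = '\t'
      · simp only [List.foldl_cons, if_neg hc, if_pos (Or.inr hw)]
        rw [ih]
        simp [pvRun, hc, hw]
      · simp only [List.foldl_cons, if_neg hc, if_neg (by tauto : ¬ (c = '\n' ∨ c = ' ' ∨ c = '\t'))]
        rw [ih]
        simp [pvRun, hc, hw]

-- B's inner loop on one segment
lemma pvFoldInner (line : List Char) (i : Int) : ∀ (s : List Char) (ls : List Int),
    line.foldl
      (fun (acc : List Char × List Int) c =>
        if c = ' ' ∨ c = '\t' then acc else (acc.1 ++ [c], acc.2 ++ [i]))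
      (s, ls)
    = (s ++ pvFilt line, ls ++ List.replicate (pvFilt line).length i) := by
  induction line with
  | nil => intro s ls; simp [pvFilt]
  | cons c l ih =>
    intro s ls
    by_cases hw : c = ' ' ∨ c = '\t'
    · simp only [List.foldl_cons, if_pos hw]
      rw [ih]
      simp [pvFilt_cons, hw]
    · simp only [List.foldl_cons, if_neg hw]
      rw [ih]
      simp [pvFilt_cons, hw, List.replicate_succ]

-- B's outer loop computes pvRunParts
lemma pvFoldB (parts : List (List Char)) : ∀ (i : Int) (s : List Char) (ls : List Int),
    (PySem.List.enumerate parts i).foldl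
      (fun (acc : List Char × List Int) (p : Int × List Char) =>
        p.2.foldl
          (fun (acc : List Char × List Int) c =>
            if c = ' ' ∨ c = '\t' then acc else (acc.1 ++ [c], acc.2 ++ [p.1]))
          acc)
      (s, ls)
    = (s ++ (pvRunParts i parts).1, ls ++ (pvRunParts i parts).2) := by
  induction parts with
  | nil => intro i s ls; simp [PySem.List.enumerate_nil, pvRunParts]
  | cons p ps ih =>
    intro i s ls
    rw [PySem.List.enumerate_cons]
    simp only [List.foldl_cons]
    rw [pvFoldInner, ih]
    simp [pvRunParts]

-- the bridge: the split-and-enumerate semantics equals the running-counter semantics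
lemma pvBridge (cs : List Char) : ∀ (n : Int),
    pvRun n cs = pvRunParts n ((pvSplit cs).1 :: (pvSplit cs).2) := by
  induction cs with
  | nil => intro n; simp [pvRun, pvSplit, pvRunParts, pvFilt]
  | cons c cs ih =>
    intro n
    by_cases hc : c = '\n'
    · subst hc
      simp only [pvSplit]
      show pvRun n ('\n' :: cs) = pvRunParts n ([] :: (pvSplit cs).1 :: (pvSplit cs).2)
      rw [show pvRun n ('\n' :: cs) = pvRun (n + 1) cs from by simp [pvRun]]
      rw [ih]
      simp [pvRunParts, pvFilt]
    · by_cases hw : c = ' ' ∨ c = '\t'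
      · simp only [pvSplit, if_neg hc]
        show pvRun n (c :: cs) = pvRunParts n ((c :: (pvSplit cs).1) :: (pvSplit cs).2)
        rw [show pvRun n (c :: cs) = pvRun n cs from by simp [pvRun, hc, hw]]
        rw [ih]
        simp [pvRunParts, pvFilt_cons, hw]
      · simp only [pvSplit, if_neg hc]
        show pvRun n (c :: cs) = pvRunParts n ((c :: (pvSplit cs).1) :: (pvSplit cs).2)
        rw [show pvRun n (c :: cs) = (c :: (pvRun n cs).1, n :: (pvRun n cs).2) from by
          simp [pvRun, hc, hw]]
        rw [ih]
        simp [pvRunParts, pvFilt_cons, hw, List.replicate_succ]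

-- ===== VERDICT (by name: the statement is the Claim_ definition above) =====
theorem whitespaced_stripped_with_line_numbers_py_spec : Claim_equal_whitespaced_stripped_with_line_numbers_py := by
  intro string _
  unfold Spec_whitespaced_stripped_with_line_numbers_py
  simp only [whitespaced_stripped_with_line_numbers_py, whitespaced_stripped_with_line_numbers_py_alt,
    pvSplitOn_eq, pvFoldA, pvFoldB]
  rw [← pvBridge]
  simp [pvSplit_snd_length]
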